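-- pv_equiv track=rewrite | github.com/kymjs/Custard | tools/github/import_anthropic_skills.py | _pick_markdown_file_from_contents
-- ===== SOURCE A (Python) =====
-- from typing import Optional
--
-- def _pick_markdown_file_from_contents(files: list[dict]) -> Optional[dict]:
--     if not files:
--         return None
--
--     lower = {str(it.get("name") or "").lower(): it for it in files}
--     for name in ("skill.md", "readme.md"):
--         if name in lower:
--             return lower[name]
--
--     md_files = [it for it in files if str(it.get("name") or "").lower().endswith(".md")]
--     md_files.sort(key=lambda it: str(it.get("name") or "").lower())
--     return md_files[0] if md_files else None
-- ===== SOURCE B (Python) =====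
-- from typing import Optional
--
-- def _pick_markdown_file_from_contents(files: list[dict]) -> Optional[dict]:
--     # single pass (alternative to dict+sort): remember last skill.md / readme.md, and the lexicographically
--     # smallest .md name seen so far (strict '<' keeps the earliest on ties)
--     skill_item = None
--     readme_item = None
--     best = None  # (lowered name, item)
--     for it in files:
--         n = str(it.get("name") or "").lower()
--         if n == "skill.md":
--             skill_item = it
--         if n == "readme.md":
--             readme_item = it
--         if n.endswith(".md"):
--             if best is None or n < best[0]:
--                 best = (n, it)
--     if skill_item is not None:
--         return skill_item
--     if readme_item is not None:
--         return readme_item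
--     return best[1] if best is not None else None
-- ===== Notes on version B (the rewrite author's own statement) =====
-- stated objective: alternative
-- what changed: Replaced the dict build plus the filter-and-sort of all .md files by one pass over the list that keeps the last skill.md/readme.md item and the item with the strictly smallest lowercased .md name (strict < preserves the stable sort's tie order).
import Mathlib
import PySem

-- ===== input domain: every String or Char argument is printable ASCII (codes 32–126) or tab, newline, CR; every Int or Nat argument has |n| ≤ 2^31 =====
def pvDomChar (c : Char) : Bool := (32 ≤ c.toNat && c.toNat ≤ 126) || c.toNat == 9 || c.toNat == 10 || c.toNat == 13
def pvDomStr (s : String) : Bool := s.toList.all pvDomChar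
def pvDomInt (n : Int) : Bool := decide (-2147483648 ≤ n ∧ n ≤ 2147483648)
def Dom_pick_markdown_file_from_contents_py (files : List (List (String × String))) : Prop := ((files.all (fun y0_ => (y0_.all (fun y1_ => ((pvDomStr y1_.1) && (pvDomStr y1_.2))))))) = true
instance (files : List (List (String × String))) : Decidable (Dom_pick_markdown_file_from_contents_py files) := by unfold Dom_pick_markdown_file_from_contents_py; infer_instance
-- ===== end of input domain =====

-- B replaces A's dict build + filter-and-sort by one scan (last skill/readme, strict-min .md name); equivalence of the returned value is proved on all inputs.

-- shared accessor: str(it.get("name") or "").lower()  (both Pythons compute this same expression)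
def pvLowName (it : List (String × String)) : String :=
  PySem.Str.lower ((PySem.Dict.get? (PySem.Dict.mk it) "name").getD "")

-- ===== PORT A =====
-- the 'for name in ("skill.md", "readme.md"): if name in lower: return lower[name]' loop
def pvPickNamed (lower : PySem.Dict String (List (String × String))) :
    List String → Option (List (String × String))
  | [] => none
  | n :: rest =>
    match lower.get? n with
    | some it => some it
    | none => pvPickNamed lower rest

def pick_markdown_file_from_contents_py (files : List (List (String × String))) : Option (List (String × String)) :=
  if files = [] then none
  else
    let lower := files.foldl (fun d it => d.insert (pvLowName it) it) PySem.Dict.empty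
    match pvPickNamed lower ["skill.md", "readme.md"] with
    | some it => some it
    | none =>
      let md_files := files.filter (fun it => PySem.Str.endswith (pvLowName it) ".md")
      let sorted_md := PySem.List.sorted md_files (fun it => pvLowName it) false
      sorted_md.head?

-- ===== PORT B =====
def pick_markdown_file_from_contents_py_alt (files : List (List (String × String))) : Option (List (String × String)) :=
  let st := files.foldl
    (fun (st : Option (List (String × String)) × Option (List (String × String)) × Option (String × List (String × String))) it =>
      let n := pvLowName it
      (if n = "skill.md" then some it else st.1,
       if n = "readme.md" then some it else st.2.1,
       if PySem.Str.endswith n ".md" then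
         match st.2.2 with
         | none => some (n, it)
         | some b => if n < b.1 then some (n, it) else some b
       else st.2.2))
    (none, none, none)
  match st.1 with
  | some it => some it
  | none =>
    match st.2.1 with
    | some it => some it
    | none => st.2.2.map (·.2)

-- ===== PRECONDITION & SPEC =====
def Spec_pick_markdown_file_from_contents_py (files : List (List (String × String))) (out : Option (List (String × String))) : Prop := out = pick_markdown_file_from_contents_py_alt files
instance (files : List (List (String × String))) (out : Option (List (String × String))) : Decidable (Spec_pick_markdown_file_from_contents_py files out) := by unfold Spec_pick_markdown_file_from_contents_py; infer_instance

-- ===== CLAIM (what is proved, stated in full; the proofs are below) =====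
def Claim_equal_pick_markdown_file_from_contents_py : Prop := ∀ (files : List (List (String × String))), Dom_pick_markdown_file_from_contents_py files → Spec_pick_markdown_file_from_contents_py files (pick_markdown_file_from_contents_py files)

-- ===== LEMMAS AND PROOFS =====

-- the dict lookup after the insert loop is the 'last matching item wins' fold
theorem pv_get_foldl_insert (l : List (List (String × String)))
    (d : PySem.Dict String (List (String × String))) (x : String) :
    (l.foldl (fun d it => d.insert (pvLowName it) it) d).get? x
      = l.foldl (fun acc it => if pvLowName it = x then some it else acc) (d.get? x) := by
  induction l generalizing d with
  | nil => rfl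
  | cons a t ih =>
    simp only [List.foldl_cons]
    rw [ih, PySem.Dict.get?_insert]
    by_cases h : pvLowName a = x
    · simp [h]
    · simp [h, Ne.symm h]

-- B's triple-state fold splits into three independent folds
theorem pv_fold_split (l : List (List (String × String)))
    (s r : Option (List (String × String))) (b : Option (String × List (String × String))) :
    l.foldl
      (fun (st : Option (List (String × String)) × Option (List (String × String)) × Option (String × List (String × String))) it =>
        let n := pvLowName it
        (if n = "skill.md" then some it else st.1,
         if n = "readme.md" then some it else st.2.1,
         if PySem.Str.endswith n ".md" then
           match st.2.2 with
           | none => some (n, it)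
           | some b => if n < b.1 then some (n, it) else some b
         else st.2.2))
      (s, r, b)
    = (l.foldl (fun acc it => if pvLowName it = "skill.md" then some it else acc) s,
       l.foldl (fun acc it => if pvLowName it = "readme.md" then some it else acc) r,
       l.foldl
         (fun acc it =>
           if PySem.Str.endswith (pvLowName it) ".md" then
             match acc with
             | none => some (pvLowName it, it)
             | some b => if pvLowName it < b.1 then some (pvLowName it, it) else some b
           else acc)
         b) := by
  induction l generalizing s r b with
  | nil => rfl
  | cons a t ih => simp only [List.foldl_cons]; exact ih _ _ _

-- the guarded best-fold only sees the .md-filtered elements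
theorem pv_best_filter (l : List (List (String × String)))
    (b : Option (String × List (String × String))) :
    l.foldl
      (fun acc it =>
        if PySem.Str.endswith (pvLowName it) ".md" then
          match acc with
          | none => some (pvLowName it, it)
          | some b => if pvLowName it < b.1 then some (pvLowName it, it) else some b
        else acc)
      b
    = (l.filter (fun it => PySem.Str.endswith (pvLowName it) ".md")).foldl
        (fun acc it =>
          match acc with
          | none => some (pvLowName it, it)
          | some b => if pvLowName it < b.1 then some (pvLowName it, it) else some b)
        b := by
  induction l generalizing b with
  | nil => rfl
  | cons a t ih =>
    by_cases h : PySem.Str.endswith (pvLowName a) ".md" = true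
    · simp only [List.foldl_cons, List.filter_cons, h, if_true]
      exact ih _
    · simp only [List.foldl_cons, List.filter_cons, h]
      exact ih b

-- min? written as the explicit running-minimum fold (definitional unfolding)
theorem pv_min_eq (m : List (List (String × String))) :
    PySem.List.min? m (fun it => pvLowName it)
      = m.foldl
          (fun acc x =>
            match acc with
            | none => some x
            | some mm => if pvLowName x < pvLowName mm then some x else some mm)
          none := by
  unfold PySem.List.min?
  congr 1
  funext acc x
  cases acc <;> rfl

-- the unguarded best-fold is min? decorated with its key
theorem pv_best_min (m : List (List (String × String))) (o : Option (List (String × String))) :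
    m.foldl
      (fun acc it =>
        match acc with
        | none => some (pvLowName it, it)
        | some b => if pvLowName it < b.1 then some (pvLowName it, it) else some b)
      (o.map (fun it => (pvLowName it, it)))
    = (m.foldl
        (fun acc x =>
          match acc with
          | none => some x
          | some mm => if pvLowName x < pvLowName mm then some x else some mm)
        o).map (fun it => (pvLowName it, it)) := by
  induction m generalizing o with
  | nil => rfl
  | cons a t ih =>
    simp only [List.foldl_cons]
    cases o with
    | none => exact ih (some a)
    | some w =>
      by_cases h : pvLowName a < pvLowName w
      · simpa [Option.map, h] using ih (some a)
      · simpa [Option.map, h] using ih (some w)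

theorem pv_best_min' (m : List (List (String × String))) :
    m.foldl
      (fun acc it =>
        match acc with
        | none => some (pvLowName it, it)
        | some b => if pvLowName it < b.1 then some (pvLowName it, it) else some b)
      none
    = (PySem.List.min? m (fun it => pvLowName it)).map (fun it => (pvLowName it, it)) := by
  rw [pv_min_eq]
  simpa using pv_best_min m none

-- head of insertBy
theorem pv_head_insertBy (before : (List (String × String)) → (List (String × String)) → Bool)
    (x : List (String × String)) (acc : List (List (String × String))) :
    (PySem.List.insertBy before x acc).head?
      = match acc.head? with
        | none => some x
        | some h => if before x h then some x else some h := by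
  cases acc with
  | nil => rfl
  | cons y ys =>
    simp only [PySem.List.insertBy]
    by_cases h : before x y <;> simp [h]

-- head of the stable sort is the first key-minimal element (Python's min with key)
theorem pv_head_sorted (m : List (List (String × String))) :
    (PySem.List.sorted m (fun it => pvLowName it) false).head?
      = PySem.List.min? m (fun it => pvLowName it) := by
  rw [PySem.List.sorted_eq_foldl_insertBy, pv_min_eq]
  have key : ∀ (t init : List (List (String × String))),
      (t.foldl (fun acc x => PySem.List.insertBy (fun a b => decide (pvLowName a < pvLowName b)) x acc) init).head?
        = t.foldl
            (fun acc x =>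
              match acc with
              | none => some x
              | some mm => if pvLowName x < pvLowName mm then some x else some mm)
            init.head? := by
    intro t
    induction t with
    | nil => intro init; rfl
    | cons a s ih =>
      intro init
      simp only [List.foldl_cons]
      rw [ih]
      congr 1
      rw [pv_head_insertBy]
      cases init.head? with
      | none => rfl
      | some h => by_cases hb : pvLowName a < pvLowName h <;> simp [hb]
  simpa only [List.head?_nil] using key m []

-- ===== VERDICT (by name: the statement is the Claim_ definition above) =====
theorem pick_markdown_file_from_contents_py_spec : Claim_equal_pick_markdown_file_from_contents_py := by
  intro files _
  unfold Spec_pick_markdown_file_from_contents_py pick_markdown_file_from_contents_py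
    pick_markdown_file_from_contents_py_alt
  by_cases hf : files = []
  · subst hf; rfl
  · simp only [if_neg hf, pv_fold_split, pvPickNamed,
      pv_get_foldl_insert files PySem.Dict.empty, PySem.Dict.get?_empty]
    cases hS : files.foldl (fun acc it => if pvLowName it = "skill.md" then some it else acc) none with
    | some it => simp
    | none =>
      cases hR : files.foldl (fun acc it => if pvLowName it = "readme.md" then some it else acc) none with
      | some it => simp
      | none =>
        simp only []
        rw [pv_head_sorted, pv_best_filter, pv_best_min']
        cases PySem.List.min? (files.filter (fun it => PySem.Str.endswith (pvLowName it) ".md"))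
            (fun it => pvLowName it) <;> rfl
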